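-- pv_equiv track=rewrite | github.com/pypi-data/pypi-mirror-26 | packages/SPLAT-library/SPLAT-library-0.4.4.tar.gz/SPLAT-library-0.4.4/splat/Util.py | typify
-- ===== SOURCE A (Python) =====
-- def typify(tokens):
-- 	"""
-- 	Returns a dictionary of unique types with their frequencies.
-- 	:param tokens:a list of tokens
-- 	:type tokens:list
-- 	:return:a dictionary of unique types with their frequencies.
-- 	:rtype:dict
-- 	"""
-- 	temp_types = {}
-- 	for word in tokens:
-- 		if word not in temp_types.keys():
-- 			temp_types[word] = 1
-- 		else:
-- 			temp_types[word] += 1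
--
-- 	return sorted(temp_types.items())
-- ===== SOURCE B (Python) =====
-- def typify(tokens):
--     out = []
--     for t in sorted(tokens):
--         if out and out[-1][0] == t:
--             out[-1] = (t, out[-1][1] + 1)
--         else:
--             out.append((t, 1))
--     return out
-- ===== Notes on version B (the rewrite author's own statement) =====
-- stated objective: alternative
-- what changed: B sorts the token list first and counts runs of equal tokens in one pass over the sorted sequence, instead of building a frequency dict and sorting its items at the end.
import Mathlib
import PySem

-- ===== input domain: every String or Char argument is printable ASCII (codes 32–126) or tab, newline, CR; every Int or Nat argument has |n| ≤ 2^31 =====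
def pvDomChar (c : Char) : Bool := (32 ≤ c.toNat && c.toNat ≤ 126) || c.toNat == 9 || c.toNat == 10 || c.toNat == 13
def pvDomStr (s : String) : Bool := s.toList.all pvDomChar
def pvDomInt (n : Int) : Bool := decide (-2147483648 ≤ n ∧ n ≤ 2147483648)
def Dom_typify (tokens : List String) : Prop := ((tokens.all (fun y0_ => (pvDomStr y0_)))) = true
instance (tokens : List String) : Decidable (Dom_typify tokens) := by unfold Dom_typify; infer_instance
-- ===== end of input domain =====

-- B sorts the token list and counts runs of equal tokens in one pass, instead of building a frequency dict and sorting its items.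


-- ===== PORT A =====
-- for word in tokens: if word not in temp_types.keys(): temp_types[word] = 1 else: temp_types[word] += 1
-- return sorted(temp_types.items())   (tuples compare lexicographically: first key, then value)
def typify (tokens : List String) : List (String × Int) :=
  let temp_types : PySem.Dict String Int :=
    tokens.foldl
      (fun d word =>
        if !d.contains word then d.insert word 1
        else d.insert word (d.getD word 0 + 1))
      PySem.Dict.empty
  PySem.List.sorted2 temp_types.items Prod.fst Prod.snd

-- ===== PORT B =====
-- out = []; for t in sorted(tokens): if out and out[-1][0] == t: out[-1] = (t, out[-1][1]+1) else: out.append((t,1))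
def typify_alt (tokens : List String) : List (String × Int) :=
  (PySem.List.sorted tokens (fun x => x)).foldl
    (fun out t =>
      match out.getLast? with
      | some last => if last.1 == t then out.dropLast ++ [(t, last.2 + 1)] else out ++ [(t, 1)]
      | none => out ++ [(t, 1)])
    []

-- ===== PRECONDITION & SPEC =====
def Spec_typify (tokens : List String) (out : List (String × Int)) : Prop := out = typify_alt tokens
instance (tokens : List String) (out : List (String × Int)) : Decidable (Spec_typify tokens out) := by unfold Spec_typify; infer_instance

-- ===== CLAIM (what is proved, stated in full; the proofs are below) =====
def Claim_equal_typify : Prop := ∀ (tokens : List String), Dom_typify tokens → Spec_typify tokens (typify tokens)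

-- ===== LEMMAS AND PROOFS =====

-- B's loop body, named for the proofs (definitionally the lambda in typify_alt)
def stepB (out : List (String × Int)) (t : String) : List (String × Int) :=
  match out.getLast? with
  | some last => if last.1 == t then out.dropLast ++ [(t, last.2 + 1)] else out ++ [(t, 1)]
  | none => out ++ [(t, 1)]

theorem typify_alt_eq_foldl (tokens : List String) :
    typify_alt tokens = (PySem.List.sorted tokens (fun x => x)).foldl stepB [] := rfl

-- insertBy only compares x with members of ys
theorem insertBy_congr {α : Type} (f g : α → α → Bool) (x : α) :
    ∀ ys : List α, (∀ y ∈ ys, f x y = g x y) →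
      PySem.List.insertBy f x ys = PySem.List.insertBy g x ys := by
  intro ys
  induction ys with
  | nil => intro _; rfl
  | cons y ys ih =>
    intro h
    rw [PySem.List.insertBy.eq_2, PySem.List.insertBy.eq_2, h y (by simp)]
    split
    · rfl
    · rw [ih (fun z hz => h z (by simp [hz]))]

-- the insertion-sort fold only compares members of S when everything stays inside S
theorem foldl_insertBy_congr {α : Type} (f g : α → α → Bool) (S : List α)
    (hS : ∀ a ∈ S, ∀ b ∈ S, f a b = g a b) :
    ∀ (xs acc : List α), (∀ x ∈ xs, x ∈ S) → (∀ x ∈ acc, x ∈ S) →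
      xs.foldl (fun acc x => PySem.List.insertBy f x acc) acc
        = xs.foldl (fun acc x => PySem.List.insertBy g x acc) acc := by
  intro xs
  induction xs with
  | nil => intro _ _ _; rfl
  | cons x xs ih =>
    intro acc hxs hacc
    have hx : x ∈ S := hxs x (by simp)
    simp only [List.foldl_cons]
    rw [insertBy_congr f g x acc (fun y hy => hS x hx y (hacc y hy))]
    exact ih _ (fun z hz => hxs z (by simp [hz]))
      (fun z hz => (PySem.List.mem_insertBy _ _ _ _).1 hz |>.elim
        (fun h => h ▸ hx) (fun h => hacc z h))

-- on a list whose elements are determined by their first components, Python's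
-- lexicographic tuple sort is the sort by first component
theorem sorted2_eq_sorted_fst (l : List (String × Int))
    (hinj : ∀ a ∈ l, ∀ b ∈ l, a.1 = b.1 → a = b) :
    PySem.List.sorted2 l Prod.fst Prod.snd = PySem.List.sorted l Prod.fst := by
  rw [PySem.List.sorted_eq_foldl_insertBy]
  show l.foldl (fun acc x => PySem.List.insertBy
      (fun a b => decide (a.1 < b.1) || (!decide (b.1 < a.1) && decide (a.2 < b.2))) x acc) []
    = _
  apply foldl_insertBy_congr _ _ l _ l [] (fun _ h => h) (by simp)
  intro a ha b hb
  by_cases h : a.1 = b.1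
  · have hab : a = b := hinj a ha b hb h
    subst hab
    simp
  · rcases lt_or_gt_of_ne h with hlt | hgt
    · simp [hlt, not_lt_of_gt hlt]
    · simp [hgt, not_lt_of_gt hgt]

theorem ofList_sublist {α : Type} [BEq α] [LawfulBEq α] (xs : List α) :
    (PySem.Set.ofList xs).Sublist xs := by
  induction xs using List.reverseRecOn with
  | nil => simp [PySem.Set.ofList_nil]
  | append_singleton xs x ih =>
    rw [PySem.Set.ofList_append_singleton]
    by_cases hx : x ∈ PySem.Set.ofList xs
    · rw [PySem.Set.add_of_mem hx]
      exact ih.trans (List.sublist_append_left xs [x])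
    · rw [PySem.Set.add_of_not_mem hx]
      exact ih.append (List.Sublist.refl [x])

theorem pairwise_lt_ofList (xs : List String) (h : xs.Pairwise (· ≤ ·)) :
    (PySem.Set.ofList xs).Pairwise (· < ·) := by
  have hle : (PySem.Set.ofList xs).Pairwise (· ≤ ·) := List.Pairwise.sublist (ofList_sublist xs) h
  have hnd : (PySem.Set.ofList xs).Pairwise (· ≠ ·) := PySem.Set.nodup_ofList xs
  exact (hle.and hnd).imp (fun hp => lt_of_le_of_ne hp.1 hp.2)

-- in a strictly increasing list, an element bounding the whole list is the last one
theorem last_of_max (l : List String) (t : String) (hp : l.Pairwise (· < ·))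
    (ht : t ∈ l) (hmax : ∀ y ∈ l, y ≤ t) : ∃ q, l = q ++ [t] ∧ t ∉ q := by
  induction l with
  | nil => cases ht
  | cons x xs ih =>
    cases xs with
    | nil =>
      simp only [List.mem_singleton] at ht
      exact ⟨[], by simp [ht], by simp⟩
    | cons y ys =>
      rw [List.mem_cons] at ht
      rcases ht with rfl | ht
      · exfalso
        have hxy : t < y := (List.pairwise_cons.1 hp).1 y (by simp)
        exact absurd (hmax y (by simp)) (not_le_of_gt hxy)
      · obtain ⟨q, hq, htq⟩ := ih (List.pairwise_cons.1 hp).2 ht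
          (fun z hz => hmax z (List.mem_cons_of_mem x hz))
        refine ⟨x :: q, by simp [hq], ?_⟩
        have hxt : x < t := (List.pairwise_cons.1 hp).1 t ht
        simp only [List.mem_cons]
        rintro (h | h)
        · exact absurd h (ne_of_gt hxt)
        · exact htq h

-- the grouping pass over a weakly increasing list yields each distinct key with its count
theorem groupFold (zs : List String) (hz : zs.Pairwise (· ≤ ·)) :
    zs.foldl stepB [] = (PySem.Set.ofList zs).map (fun k => (k, (zs.count k : Int))) := by
  induction zs using List.reverseRecOn with
  | nil => simp [PySem.Set.ofList_nil]
  | append_singleton zs t ih =>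
    rw [List.pairwise_append] at hz
    obtain ⟨hzp, -, hbound⟩ := hz
    have hmax : ∀ y ∈ zs, y ≤ t := fun y hy => hbound y hy t (by simp)
    rw [List.foldl_append, List.foldl_cons, List.foldl_nil, ih hzp,
      PySem.Set.ofList_append_singleton]
    by_cases hmem : t ∈ zs
    · have hmem' : t ∈ PySem.Set.ofList zs := (PySem.Set.mem_ofList zs t).2 hmem
      obtain ⟨q, hq, htq⟩ := last_of_max (PySem.Set.ofList zs) t
        (pairwise_lt_ofList zs hzp) hmem'
        (fun y hy => hmax y ((PySem.Set.mem_ofList zs y).1 hy))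
      rw [PySem.Set.add_of_mem hmem', hq]
      simp only [List.map_append, List.map_cons, List.map_nil]
      rw [stepB, List.getLast?_concat]
      simp only [beq_self_eq_true, if_true, List.dropLast_concat]
      congr 1
      · apply List.map_congr_left
        intro k hk
        have hkt : k ≠ t := fun h => htq (h ▸ hk)
        simp [List.count_append, Ne.symm hkt]
      · simp [List.count_append]
    · have hmem' : t ∉ PySem.Set.ofList zs := fun h => hmem ((PySem.Set.mem_ofList zs t).1 h)
      rw [PySem.Set.add_of_not_mem hmem']
      have hcount : ∀ k ∈ PySem.Set.ofList zs, ((zs ++ [t]).count k : Int) = (zs.count k : Int) := by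
        intro k hk
        have hkt : k ≠ t := fun h => hmem (h ▸ (PySem.Set.mem_ofList zs k).1 hk)
        simp [List.count_append, Ne.symm hkt]
      have htc : ((zs ++ [t]).count t : Int) = 1 := by
        simp [List.count_append, List.count_eq_zero_of_not_mem hmem]
      rcases (PySem.Set.ofList zs).eq_nil_or_concat with h0 | ⟨q, m, hqm⟩
      · rw [h0]
        simp [stepB, List.count_eq_zero_of_not_mem hmem]
      · rw [hqm]
        simp only [List.concat_eq_append, List.map_append, List.map_cons, List.map_nil]
        rw [stepB, List.getLast?_concat]
        have hmS : m ∈ PySem.Set.ofList zs := by rw [hqm]; simp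
        have hmt : m ≠ t := fun h => hmem (h ▸ (PySem.Set.mem_ofList zs m).1 hmS)
        simp [show (m == t) = false by simp [hmt], List.count_append]
        apply congrArg₂ (· ++ ·)
        · refine (List.map_congr_left ?_).symm
          intro k hk
          have hkS : k ∈ PySem.Set.ofList zs := by
            rw [hqm, List.concat_eq_append]; exact List.mem_append_left _ hk
          have hkt : k ≠ t := fun h => hmem (h ▸ (PySem.Set.mem_ofList zs k).1 hkS)
          simp [List.count_eq_zero, hkt]
        · have hm0 : List.count m [t] = 0 := by simp [List.count_eq_zero, hmt]
          simp [hm0, List.count_eq_zero_of_not_mem hmem]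

theorem typify_eq_canonical (tokens : List String) :
    typify tokens
      = (PySem.List.sorted (PySem.Set.ofList tokens) (fun x => x)).map
          (fun k => (k, (tokens.count k : Int))) := by
  unfold typify
  have hstep : (fun (d : PySem.Dict String Int) word =>
        if !d.contains word then d.insert word 1 else d.insert word (d.getD word 0 + 1))
      = (fun (d : PySem.Dict String Int) x => d.insert x (d.getD x 0 + 1)) := by
    funext d w
    by_cases hc : d.contains w
    · simp [hc]
    · simp only [Bool.not_eq_true] at hc
      simp [hc, PySem.Dict.getD_of_not_contains d 0 hc]
  rw [hstep, PySem.Dict.foldl_insert_getD_add_one_eq_counter]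
  show PySem.List.sorted2 (PySem.Dict.counter tokens).items Prod.fst Prod.snd = _
  rw [PySem.Dict.items_counter]
  have hinj : ∀ a ∈ (PySem.Set.ofList tokens).map (fun k => (k, (tokens.count k : Int))),
      ∀ b ∈ (PySem.Set.ofList tokens).map (fun k => (k, (tokens.count k : Int))),
      a.1 = b.1 → a = b := by
    intro a ha b hb hab
    obtain ⟨ka, -, rfl⟩ := List.mem_map.1 ha
    obtain ⟨kb, -, rfl⟩ := List.mem_map.1 hb
    simp only at hab
    rw [hab]
  rw [sorted2_eq_sorted_fst _ hinj]
  exact PySem.List.sorted_eq_of_perm_of_pairwise_lt _ _ Prod.fst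
    (((PySem.List.sorted_perm (PySem.Set.ofList tokens) (fun x => x) false)).map _)
    (List.Pairwise.map _ (fun _ _ h => h) (PySem.List.sorted_ofList_pairwise_lt tokens))

theorem typify_alt_eq_canonical (tokens : List String) :
    typify_alt tokens
      = (PySem.List.sorted (PySem.Set.ofList tokens) (fun x => x)).map
          (fun k => (k, (tokens.count k : Int))) := by
  rw [typify_alt_eq_foldl,
    groupFold _ (PySem.List.sorted_pairwise tokens (fun x => x))]
  have hperm := PySem.List.sorted_perm tokens (fun x => x) false
  have hofl : PySem.List.sorted (PySem.Set.ofList tokens) (fun x => x)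
      = PySem.Set.ofList (PySem.List.sorted tokens (fun x => x)) := by
    apply PySem.List.sorted_eq_of_perm_of_pairwise_lt
    · exact (List.perm_ext_iff_of_nodup (PySem.Set.nodup_ofList _)
        (PySem.Set.nodup_ofList _)).2
        (fun a => by
          rw [PySem.Set.mem_ofList, PySem.Set.mem_ofList, hperm.mem_iff])
    · exact pairwise_lt_ofList _ (PySem.List.sorted_pairwise tokens (fun x => x))
  rw [hofl]
  exact List.map_congr_left (fun k _ => by rw [hperm.count_eq k])

-- ===== VERDICT (by name: the statement is the Claim_ definition above) =====
theorem typify_spec : Claim_equal_typify := by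
  intro tokens _
  unfold Spec_typify
  rw [typify_eq_canonical, typify_alt_eq_canonical]
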